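-- pv_equiv track=rewrite | github.com/cxhy/mem_gen | scripts/config_io.py | resolve_sub_type_from_lib_name
-- ===== SOURCE A (Python) =====
-- def resolve_sub_type_from_lib_name(
--     lib_name: str,
--     lib_name_map: dict[str, str],
--     strip_suffixes: tuple[str, ...] | list[str] = (),
-- ) -> str:
--     """Infer sub_type from lib_name using prefix matching.
--
--     Algorithm (matches legacy GetMemType):
--       1. Lower-case the lib_name
--       2. Strip voltage suffixes (ulvt, svt, lvt …)
--       3. Match longest prefix in lib_name_map
--     """
--     name = lib_name.lower()
--     for suffix in strip_suffixes:
--         name = name.replace(suffix, "")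
--
--     best_prefix = ""
--     best_sub_type = ""
--     for prefix, sub_type in lib_name_map.items():
--         if name.startswith(prefix) and len(prefix) > len(best_prefix):
--             best_prefix = prefix
--             best_sub_type = sub_type
--
--     if not best_prefix:
--         raise ValueError(
--             f"Cannot infer sub_type from lib_name '{lib_name}': "
--             f"no matching prefix in lib_name_map "
--             f"(available prefixes: {list(lib_name_map.keys())})"
--         )
--     return best_sub_type
-- ===== SOURCE B (Python) =====
-- def resolve_sub_type_from_lib_name(
--     lib_name: str,
--     lib_name_map: dict[str, str],
--     strip_suffixes: tuple[str, ...] | list[str] = (),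
-- ) -> str:
--     """Infer sub_type from lib_name: try prefixes of the processed name from
--     longest to shortest and return the dict value of the first one present."""
--     name = lib_name.lower()
--     for suffix in strip_suffixes:
--         name = name.replace(suffix, "")
--
--     for L in range(len(name), 0, -1):
--         if name[:L] in lib_name_map:
--             return lib_name_map[name[:L]]
--
--     raise ValueError(
--         f"Cannot infer sub_type from lib_name '{lib_name}': "
--         f"no matching prefix in lib_name_map "
--         f"(available prefixes: {list(lib_name_map.keys())})"
--     )
-- ===== Notes on version B (the rewrite author's own statement) =====
-- stated objective: alternative
-- what changed: Instead of scanning the whole map with a running longest-match maximum, B enumerates prefixes of the processed name from longest to shortest and returns the dict value of the first prefix that is a key (a prefix of a given length is unique, so tie-breaking is trivially identical).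
import Mathlib
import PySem

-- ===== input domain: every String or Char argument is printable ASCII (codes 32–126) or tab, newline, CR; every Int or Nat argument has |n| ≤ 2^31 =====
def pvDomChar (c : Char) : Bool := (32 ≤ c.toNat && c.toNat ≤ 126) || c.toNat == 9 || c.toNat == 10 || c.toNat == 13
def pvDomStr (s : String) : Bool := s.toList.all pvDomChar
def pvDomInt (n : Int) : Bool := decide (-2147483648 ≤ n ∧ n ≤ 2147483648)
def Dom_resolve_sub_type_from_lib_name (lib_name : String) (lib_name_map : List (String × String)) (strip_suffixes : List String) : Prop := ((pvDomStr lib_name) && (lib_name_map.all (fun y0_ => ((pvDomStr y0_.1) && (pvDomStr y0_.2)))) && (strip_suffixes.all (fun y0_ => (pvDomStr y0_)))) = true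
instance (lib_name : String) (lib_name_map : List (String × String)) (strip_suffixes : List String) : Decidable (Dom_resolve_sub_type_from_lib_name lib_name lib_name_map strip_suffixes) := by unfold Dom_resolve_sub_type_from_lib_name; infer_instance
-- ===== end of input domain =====

-- B replaces A's full running-max scan of the map by trying prefixes of the processed
-- name from longest to shortest with a first-match lookup (objective: alternative).

-- shared preprocessing (identical lines in both Pythons): lower-case then strip suffixes
def pvName (lib_name : String) (strip_suffixes : List String) : String :=
  strip_suffixes.foldl (fun n suf => PySem.Str.replace n suf "") (PySem.Str.lower lib_name)

-- ===== PORT A =====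
def pvStepA (name : String) (b : String × String) (kv : String × String) : String × String :=
  if PySem.Str.startswith name kv.1 && decide (b.1.toList.length < kv.1.toList.length) then kv else b

def resolve_sub_type_from_lib_name (lib_name : String) (lib_name_map : List (String × String)) (strip_suffixes : List String) : String :=
  let name := pvName lib_name strip_suffixes
  let best := lib_name_map.foldl (pvStepA name) ("", "")
  if best.1 = "" then "" else best.2   -- '"" ' stands for the ValueError branch; Pre_ excludes it

-- ===== PORT B =====
-- for L in range(len(name), 0, -1): if name[:L] in map: return map[name[:L]]
def pvFindB (m : List (String × String)) (s : List Char) : Nat → String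
  | 0 => ""            -- the loop ran out: the ValueError branch; Pre_ excludes it
  | L + 1 =>
    match m.find? (fun kv => kv.1 == String.ofList (s.take (L + 1))) with
    | some kv => kv.2
    | none => pvFindB m s L

def resolve_sub_type_from_lib_name_alt (lib_name : String) (lib_name_map : List (String × String)) (strip_suffixes : List String) : String :=
  let name := pvName lib_name strip_suffixes
  pvFindB lib_name_map name.toList name.toList.length

-- ===== PRECONDITION & SPEC =====
-- Pre_ excludes (a) inputs where A raises ValueError (no nonempty key of the map is a
-- prefix of the processed name) and (b) association lists with duplicate keys, which do
-- not represent a Python dict (dict construction collapses them).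
def Pre_resolve_sub_type_from_lib_name (lib_name : String) (lib_name_map : List (String × String)) (strip_suffixes : List String) : Prop :=
  (lib_name_map.map Prod.fst).Nodup ∧
  ∃ kv ∈ lib_name_map, kv.1 ≠ "" ∧ PySem.Str.startswith (pvName lib_name strip_suffixes) kv.1 = true

instance (lib_name : String) (lib_name_map : List (String × String)) (strip_suffixes : List String) : Decidable (Pre_resolve_sub_type_from_lib_name lib_name lib_name_map strip_suffixes) := by unfold Pre_resolve_sub_type_from_lib_name; infer_instance

def pvWitness_resolve_sub_type_from_lib_name : String × (List (String × String)) × List String :=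
  ("RF2P_ulvt", [("rf", "RF"), ("rf2p", "RF2P")], ["ulvt", "_"])

def Spec_resolve_sub_type_from_lib_name (lib_name : String) (lib_name_map : List (String × String)) (strip_suffixes : List String) (out : String) : Prop := out = resolve_sub_type_from_lib_name_alt lib_name lib_name_map strip_suffixes
instance (lib_name : String) (lib_name_map : List (String × String)) (strip_suffixes : List String) (out : String) : Decidable (Spec_resolve_sub_type_from_lib_name lib_name lib_name_map strip_suffixes out) := by unfold Spec_resolve_sub_type_from_lib_name; infer_instance

-- ===== CLAIM (what is proved, stated in full; the proofs are below) =====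
def Claim_equal_resolve_sub_type_from_lib_name : Prop := ∀ (lib_name : String) (lib_name_map : List (String × String)) (strip_suffixes : List String), Dom_resolve_sub_type_from_lib_name lib_name lib_name_map strip_suffixes → Pre_resolve_sub_type_from_lib_name lib_name lib_name_map strip_suffixes → Spec_resolve_sub_type_from_lib_name lib_name lib_name_map strip_suffixes (resolve_sub_type_from_lib_name lib_name lib_name_map strip_suffixes)

-- ===== LEMMAS AND PROOFS =====

-- A's accumulator length never decreases
lemma pv_len_le_foldA (name : String) (m : List (String × String)) (b : String × String) :
    b.1.toList.length ≤ (m.foldl (pvStepA name) b).1.toList.length := by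
  induction m generalizing b with
  | nil => simp
  | cons kv t ih =>
    refine le_trans ?_ (ih (pvStepA name b kv))
    unfold pvStepA
    split
    · rename_i h
      simp only [Bool.and_eq_true, decide_eq_true_eq] at h
      omega
    · exact le_rfl

-- every matching key's length is bounded by the final accumulator's length
lemma pv_le_foldA_of_mem (name : String) (m : List (String × String)) (b kv : String × String)
    (hm : kv ∈ m) (hp : PySem.Str.startswith name kv.1 = true) :
    kv.1.toList.length ≤ (m.foldl (pvStepA name) b).1.toList.length := by
  induction m generalizing b with
  | nil => cases hm
  | cons a t ih =>
    rcases List.mem_cons.mp hm with h | h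
    · subst h
      refine le_trans ?_ (pv_len_le_foldA name t (pvStepA name b kv))
      unfold pvStepA
      split
      · exact le_rfl
      · rename_i hc
        simp only [Bool.and_eq_true, decide_eq_true_eq, not_and, not_lt, hp, true_implies] at hc
        exact hc
    · exact ih (pvStepA name b a) h

-- the fold's result is the initial accumulator or a matching pair of the list
lemma pv_foldA_mem (name : String) (m : List (String × String)) (b : String × String) :
    m.foldl (pvStepA name) b = b ∨
      (m.foldl (pvStepA name) b ∈ m ∧
        PySem.Str.startswith name (m.foldl (pvStepA name) b).1 = true) := by
  induction m generalizing b with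
  | nil => left; rfl
  | cons a t ih =>
    have h := ih (pvStepA name b a)
    simp only [List.foldl_cons]
    rcases h with h | ⟨hmem, hsw⟩
    · rw [h]
      unfold pvStepA
      split
      · rename_i hc
        simp only [Bool.and_eq_true, decide_eq_true_eq] at hc
        exact Or.inr ⟨List.mem_cons_self .., hc.1⟩
      · exact Or.inl rfl
    · exact Or.inr ⟨List.mem_cons_of_mem a hmem, hsw⟩

-- first-match lookup of a present key in a Nodup-keyed association list
lemma pv_find?_key (m : List (String × String)) (p v : String)
    (hnd : (m.map Prod.fst).Nodup) (hm : (p, v) ∈ m) :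
    m.find? (fun kv => kv.1 == p) = some (p, v) := by
  induction m with
  | nil => cases hm
  | cons a t ih =>
    simp only [List.map_cons, List.nodup_cons] at hnd
    by_cases hk : a.1 = p
    · have : a = (p, v) := by
        rcases List.mem_cons.mp hm with h | h
        · exact h.symm
        · exact absurd (hk ▸ List.mem_map_of_mem h : a.1 ∈ t.map Prod.fst) hnd.1
      rw [List.find?_cons_of_pos (by simp [hk]), this]
    · rw [List.find?_cons_of_neg (by simp [hk])]
      rcases List.mem_cons.mp hm with h | h
      · exact absurd (congrArg Prod.fst h.symm) hk
      · exact ih hnd.2 h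

-- B's countdown loop finds exactly the value of the longest matching key
lemma pv_findB_eq (m : List (String × String)) (s : List Char) (p v : String)
    (hnd : (m.map Prod.fst).Nodup) (hm : (p, v) ∈ m)
    (hp : p.toList = s.take p.toList.length) (hpos : 1 ≤ p.toList.length)
    (hmax : ∀ kv ∈ m, kv.1.toList <+: s → kv.1.toList.length ≤ p.toList.length) :
    ∀ L, p.toList.length ≤ L → L ≤ s.length → pvFindB m s L = v := by
  intro L
  induction L with
  | zero => intro h _; omega
  | succ K ih =>
    intro hML hLs
    by_cases hL : p.toList.length = K + 1
    · have hkey : String.ofList (s.take (K + 1)) = p := by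
        rw [← hL, ← hp]; exact String.ofList_toList
      unfold pvFindB
      rw [hkey, pv_find?_key m p v hnd hm]
    · have hnone : m.find? (fun kv => kv.1 == String.ofList (s.take (K + 1))) = none := by
        apply List.find?_eq_none.mpr
        intro kv hkv hbeq
        have hkv1 : kv.1 = String.ofList (s.take (K + 1)) := by
          exact beq_iff_eq.mp hbeq
        have hlist : kv.1.toList = s.take (K + 1) := by
          rw [hkv1, String.toList_ofList]
        have hpre : kv.1.toList <+: s := hlist ▸ List.take_prefix _ _
        have hlen : kv.1.toList.length = K + 1 := by
          rw [hlist, List.length_take]; omega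
        have := hmax kv hkv hpre
        omega
      unfold pvFindB
      rw [hnone]
      exact ih (by omega) (by omega)

-- ===== VERDICT (by name: the statement is the Claim_ definition above) =====
theorem resolve_sub_type_from_lib_name_spec : Claim_equal_resolve_sub_type_from_lib_name := by
  intro lib_name m suffixes _ hpre
  obtain ⟨hnd, kv0, hkv0, hne0, hsw0⟩ := hpre
  unfold Spec_resolve_sub_type_from_lib_name resolve_sub_type_from_lib_name resolve_sub_type_from_lib_name_alt
  set name := pvName lib_name suffixes with hname
  set r := m.foldl (pvStepA name) ("", "") with hr
  have hkv0pos : 1 ≤ kv0.1.toList.length := by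
    rcases Nat.lt_or_ge 0 kv0.1.toList.length with h | h
    · omega
    · exfalso; apply hne0
      have : kv0.1.toList = [] := List.length_eq_zero_iff.mp (by omega)
      have h2 := congrArg String.ofList this
      rwa [String.ofList_toList] at h2
  have hrlen : kv0.1.toList.length ≤ r.1.toList.length :=
    pv_le_foldA_of_mem name m ("", "") kv0 hkv0 hsw0
  rcases pv_foldA_mem name m ("", "") with hcase | ⟨hmem, hsw⟩
  · exfalso
    rw [← hr] at hcase
    rw [hcase] at hrlen
    have h0 : (("", "") : String × String).1.toList.length = 0 := rfl
    rw [h0] at hrlen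
    omega
  · have hswp : r.1.toList <+: name.toList := by
      have := hsw
      simp only [PySem.Str.startswith_eq] at this
      exact (PySem.Chars.startswith_iff _ _).mp this
    have hrpos : 1 ≤ r.1.toList.length := le_trans hkv0pos hrlen
    have hrne : r.1 ≠ "" := by
      intro h; rw [h] at hrpos; simp at hrpos
    have htake : r.1.toList = name.toList.take r.1.toList.length :=
      (List.prefix_iff_eq_take.mp hswp)
    have hmax : ∀ kv ∈ m, kv.1.toList <+: name.toList → kv.1.toList.length ≤ r.1.toList.length := by
      intro kv hkv hpre
      apply pv_le_foldA_of_mem name m ("", "") kv hkv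
      simp only [PySem.Str.startswith_eq]
      exact (PySem.Chars.startswith_iff _ _).mpr hpre
    have hB := pv_findB_eq m name.toList r.1 r.2 hnd (by simpa using hmem) htake hrpos hmax
      name.toList.length (hswp.length_le) le_rfl
    simp only []
    rw [← hr, if_neg hrne, hB]
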